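-- pv_equiv track=rewrite | github.com/5-million/solve-algorithm | programmers/kakao/순위_검색_v1.py | make_all_case
-- ===== SOURCE A (Python) =====
-- def make_all_case(info):
--     inf = info.split()
--     score = int(inf.pop())
--
--     ret = ['']
--     for i in inf:
--         temp = []
--         for r in ret:
--             temp.append(r + i)
--             temp.append(r + '-')
--         ret = temp
--
--     return ret, score
-- ===== SOURCE B (Python) =====
-- def make_all_case(info):
--     inf = info.split()
--     score = int(inf.pop())
--
--     def combos(fields):
--         if not fields:
--             return ['']
--         rest = combos(fields[1:])
--         return [c + s for c in (fields[0], '-') for s in rest]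
--
--     return combos(inf), score
-- ===== Notes on version B (the rewrite author's own statement) =====
-- stated objective: alternative
-- what changed: Replaces A's iterative list-doubling loop (rebuilding the whole result list once per field) with a recursive cartesian-product construction: combos(fields) recurses on the field list and prefixes each choice (field or '-') onto the combinations of the rest, emitting the same order.
import Mathlib
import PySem

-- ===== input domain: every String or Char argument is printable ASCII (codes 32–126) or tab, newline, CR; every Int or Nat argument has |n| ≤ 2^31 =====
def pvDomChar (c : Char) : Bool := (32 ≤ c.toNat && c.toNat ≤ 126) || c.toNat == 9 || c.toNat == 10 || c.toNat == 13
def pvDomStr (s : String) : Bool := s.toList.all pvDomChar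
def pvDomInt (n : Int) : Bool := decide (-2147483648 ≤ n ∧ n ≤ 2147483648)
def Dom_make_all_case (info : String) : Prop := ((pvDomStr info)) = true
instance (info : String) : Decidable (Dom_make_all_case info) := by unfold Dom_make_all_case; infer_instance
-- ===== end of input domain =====

-- B replaces A's iterative list-doubling loop with a recursive cartesian-product construction (same order, same cost); alternative decomposition.


-- ===== PORT A =====
-- 'inf.pop()' = PySem.List.pop? inf (-1) (IndexError = none); 'int(…)' = PySem.Int.ofStr? (ValueError = none)
def make_all_case (info : String) : List String × Int :=
  match PySem.List.pop? (PySem.Str.split₀ info) (-1) with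
  | none => ([], 0)  -- unreachable under Pre_
  | some (last, inf) =>
    match PySem.Int.ofStr? last with
    | none => ([], 0)  -- unreachable under Pre_
    | some score =>
      (inf.foldl (fun ret i => ret.foldl (fun temp r => temp ++ [r ++ i, r ++ "-"]) []) [""], score)

-- ===== PORT B =====
-- Source B's recursive combos(fields): '[c + s for c in (fields[0], '-') for s in rest]'
def pvCombos : List String → List String
  | [] => [""]
  | f :: rest => [f, "-"].flatMap (fun c => (pvCombos rest).map (fun s => c ++ s))

def make_all_case_alt (info : String) : List String × Int :=
  match PySem.List.pop? (PySem.Str.split₀ info) (-1) with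
  | none => ([], 0)  -- unreachable under Pre_
  | some (last, inf) =>
    match PySem.Int.ofStr? last with
    | none => ([], 0)  -- unreachable under Pre_
    | some score => (pvCombos inf, score)

-- ===== PRECONDITION & SPEC =====
-- Pre_ excludes exactly the inputs where A raises: no whitespace-separated token at all
-- (pop() → IndexError) or a last token int() rejects (ValueError).
def Pre_make_all_case (info : String) : Prop :=
  ((PySem.Str.split₀ info).getLast?.bind PySem.Int.ofStr?).isSome = true
instance (info : String) : Decidable (Pre_make_all_case info) := by unfold Pre_make_all_case; infer_instance

def pvWitness_make_all_case : String := "java back 150"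

def Spec_make_all_case (info : String) (out : List String × Int) : Prop := out = make_all_case_alt info
instance (info : String) (out : List String × Int) : Decidable (Spec_make_all_case info out) := by unfold Spec_make_all_case; infer_instance

-- ===== CLAIM (what is proved, stated in full; the proofs are below) =====
def Claim_equal_make_all_case : Prop := ∀ (info : String), Dom_make_all_case info → Pre_make_all_case info → Spec_make_all_case info (make_all_case info)

-- ===== LEMMAS AND PROOFS =====

-- A's doubling loop, generalized over the accumulator, equals prefixing each element of ret onto B's product.
theorem pvFoldl_eq_combos (inf : List String) (ret : List String) :
    inf.foldl (fun ret i => ret.foldl (fun temp r => temp ++ [r ++ i, r ++ "-"]) []) ret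
      = ret.flatMap (fun r => (pvCombos inf).map (fun s => r ++ s)) := by
  induction inf generalizing ret with
  | nil => simp [pvCombos]
  | cons i rest ih =>
    rw [List.foldl_cons, ih]
    simp only [PySem.List.foldl_append_eq_flatMap, List.nil_append, List.flatMap_assoc]
    simp [pvCombos, List.flatMap_cons, List.map_map, Function.comp_def, String.append_assoc,
      List.flatMap_append]

-- ===== VERDICT (by name: the statement is the Claim_ definition above) =====
theorem make_all_case_spec : Claim_equal_make_all_case := by
  intro info _ _
  unfold Spec_make_all_case make_all_case make_all_case_alt
  rcases hp : PySem.List.pop? (PySem.Str.split₀ info) (-1) with _ | ⟨last, inf⟩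
  · rfl
  · rcases hs : PySem.Int.ofStr? last with _ | score
    · simp only [hs]
    · simp only [hs, pvFoldl_eq_combos, List.flatMap_cons, List.flatMap_nil, List.append_nil]
      simp
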